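-- pv_equiv track=rewrite | github.com/FLC-QU-hep/CaloTransfer | calotransfer/scripts/utils/plot_finals.py | build_group_to_indices
-- ===== SOURCE A (Python) =====
-- def build_group_to_indices(strategy_configs, group_prefixes=None):
--     """
--     Build a mapping from group label → list of strategy indices,
--     using prefix matching. Falls back to the strategy key itself if
--     no prefix group matches.
--
--     Parameters:
--       strategy_configs (dict): your original configs, keys are strategy names.
--       group_prefixes (dict): { group_label: [prefix1, prefix2, …] }.
--
--     Returns:
--       group_to_indices (dict): { group_label: [indices …] }.
--     """
--     group_to_indices = {}
--     for idx, strategy in enumerate(strategy_configs):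
--         placed = False
--         if group_prefixes:
--             for grp, prefixes in group_prefixes.items():
--                 if any(strategy.startswith(pref) for pref in prefixes):
--                     group_to_indices.setdefault(grp, []).append(idx)
--                     placed = True
--                     break
--         if not placed:
--             # fallback: use the strategy name as its own group
--             group_to_indices.setdefault(strategy, []).append(idx)
--     return group_to_indices
-- ===== SOURCE B (Python) =====
-- def build_group_to_indices(strategy_configs, group_prefixes=None):
--     """Group-major version with a shrinking pool: sweep the groups in declaration
--     order; each group claims (into `assigned`) the still-undecided strategies whose
--     name starts with one of its prefixes and the rest stay in the pool (inverted
--     loop nesting, no placed-flag/break); a final pass then collects indices per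
--     label, falling back to the name.  n.startswith(tuple) == any over the prefixes."""
--     names = list(strategy_configs)
--     assigned = {}
--     undecided = list(enumerate(names))
--     for grp, prefixes in (group_prefixes or {}).items():
--         tp = tuple(prefixes)
--         still = []
--         for i, n in undecided:
--             if n.startswith(tp):
--                 assigned[i] = grp
--             else:
--                 still.append((i, n))
--         undecided = still
--     result = {}
--     for i, n in enumerate(names):
--         result.setdefault(assigned.get(i, n), []).append(i)
--     return result
-- ===== Notes on version B (the rewrite author's own statement) =====
-- stated objective: faster
-- what changed: A's item-major loop with a placed flag and break becomes a group-major sweep over a shrinking pool of undecided (index, name) pairs: each group claims its matches into an assigned dict via one C-level startswith(tuple) test and drops them from the pool, and a final pass collects indices per label with name fallback.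
import Mathlib
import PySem

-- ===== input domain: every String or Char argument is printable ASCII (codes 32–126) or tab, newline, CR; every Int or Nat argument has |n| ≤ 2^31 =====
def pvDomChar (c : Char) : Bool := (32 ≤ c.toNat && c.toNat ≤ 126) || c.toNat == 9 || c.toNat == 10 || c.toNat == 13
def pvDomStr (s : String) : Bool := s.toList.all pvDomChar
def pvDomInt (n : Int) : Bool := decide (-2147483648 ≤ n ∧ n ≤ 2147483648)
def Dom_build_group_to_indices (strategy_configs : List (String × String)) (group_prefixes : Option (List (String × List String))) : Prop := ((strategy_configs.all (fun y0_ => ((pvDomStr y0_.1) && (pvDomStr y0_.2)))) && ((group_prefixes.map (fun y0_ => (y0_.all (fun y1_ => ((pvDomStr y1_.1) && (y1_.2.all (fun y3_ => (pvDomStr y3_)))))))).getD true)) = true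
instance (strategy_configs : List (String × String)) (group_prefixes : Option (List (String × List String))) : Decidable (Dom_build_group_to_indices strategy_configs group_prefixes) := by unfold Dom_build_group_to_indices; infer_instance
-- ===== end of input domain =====

-- B inverts the loop nesting: a group-major sweep over a shrinking pool of undecided
-- (index, name) pairs assigns indices to groups, then a final pass collects indices
-- per label with name fallback (objective: faster, measured).

-- ===== PORT A =====
-- A iterates the dict's keys; the inner loop with break = first matching group (ported as find?).
def build_group_to_indices (strategy_configs : List (String × String)) (group_prefixes : Option (List (String × List String))) : List (String × List Int) :=
  ((PySem.List.enumerate (strategy_configs.map Prod.fst) 0).foldl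
    (fun (d : PySem.Dict String (List Int)) (p : Int × String) =>
      let idx := p.1
      let strategy := p.2
      -- `if group_prefixes:` — falsy for None and for the empty dict
      let hit : Option (String × List String) :=
        match group_prefixes with
        | none => none
        | some gl =>
          if gl.isEmpty then none
          else gl.find? (fun gx => gx.2.any (fun pref => PySem.Str.startswith strategy pref))
      match hit with
      | some gx => d.modify gx.1 [] (fun l => l ++ [idx])   -- setdefault(grp, []).append(idx)
      | none => d.modify strategy [] (fun l => l ++ [idx])  -- fallback: strategy as its own group
    ) PySem.Dict.empty).items

-- ===== PORT B =====
-- n.startswith(tp) for a tuple tp of prefixes (exact: True iff some prefix matches)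
def bgtiStarts (n : String) (tp : List String) : Bool :=
  tp.any (fun q => PySem.Str.startswith n q)

-- the group-major sweep: state = (assigned dict, undecided (index, name) pairs);
-- each group claims the undecided pairs it matches, the rest stay in the pool
def bgtiSweep (gl : List (String × List String))
    (st : PySem.Dict Int String × List (Int × String)) :
    PySem.Dict Int String × List (Int × String) :=
  gl.foldl
    (fun (st : PySem.Dict Int String × List (Int × String)) gx =>
      st.2.foldl
        (fun (st2 : PySem.Dict Int String × List (Int × String)) p =>
          if bgtiStarts p.2 gx.2 then (st2.1.insert p.1 gx.1, st2.2)
          else (st2.1, st2.2 ++ [p]))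
        (st.1, []))
    st

def build_group_to_indices_alt (strategy_configs : List (String × String)) (group_prefixes : Option (List (String × List String))) : List (String × List Int) :=
  let names := strategy_configs.map Prod.fst
  -- `(group_prefixes or {}).items()` — None and the empty dict both give no iterations
  let st := bgtiSweep (match group_prefixes with | none => [] | some gl => gl)
    (PySem.Dict.empty, PySem.List.enumerate names 0)
  -- final pass: result.setdefault(assigned.get(i, n), []).append(i)
  ((PySem.List.enumerate names 0).foldl
    (fun (d : PySem.Dict String (List Int)) (p : Int × String) =>
      d.modify (st.1.getD p.1 p.2) [] (fun l => l ++ [p.1]))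
    PySem.Dict.empty).items

-- ===== PRECONDITION & SPEC =====
def Spec_build_group_to_indices (strategy_configs : List (String × String)) (group_prefixes : Option (List (String × List String))) (out : List (String × List Int)) : Prop := out = build_group_to_indices_alt strategy_configs group_prefixes
instance (strategy_configs : List (String × String)) (group_prefixes : Option (List (String × List String))) (out : List (String × List Int)) : Decidable (Spec_build_group_to_indices strategy_configs group_prefixes out) := by unfold Spec_build_group_to_indices; infer_instance

-- ===== CLAIM (what is proved, stated in full; the proofs are below) =====
def Claim_equal_build_group_to_indices : Prop := ∀ (strategy_configs : List (String × String)) (group_prefixes : Option (List (String × List String))), Dom_build_group_to_indices strategy_configs group_prefixes → Spec_build_group_to_indices strategy_configs group_prefixes (build_group_to_indices strategy_configs group_prefixes)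

-- ===== LEMMAS AND PROOFS =====

-- canonical classification: first matching group's label, else the name itself
def bgtiCls (gl : List (String × List String)) (n : String) : String :=
  ((gl.find? (fun gx => bgtiStarts n gx.2)).map Prod.fst).getD n

-- A's loop body applied to (i, s) is one modify at the classified key.
theorem bgti_stepA_eq (group_prefixes : Option (List (String × List String)))
    (d : PySem.Dict String (List Int)) (i : Int) (s : String) :
    (match (match group_prefixes with
            | none => none
            | some gl =>
              if gl.isEmpty then none
              else gl.find? (fun (gx : String × List String) => gx.2.any (fun pref => PySem.Str.startswith s pref))) with
     | some gx => d.modify gx.1 [] (fun l => l ++ [i])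
     | none => d.modify s [] (fun l => l ++ [i]))
    = d.modify (bgtiCls (match group_prefixes with | none => [] | some gl => gl) s) []
        (fun l => l ++ [i]) := by
  cases group_prefixes with
  | none => rfl
  | some gl =>
    dsimp only
    by_cases h : gl.isEmpty
    · rw [List.isEmpty_iff] at h
      subst h; rfl
    · rw [if_neg h]
      unfold bgtiCls bgtiStarts
      cases hf : gl.find? (fun (gx : String × List String) => gx.2.any (fun pref => PySem.Str.startswith s pref)) with
      | none => simp
      | some gx => simp

-- A's whole fold in canonical form.
theorem bgti_foldA_eq (group_prefixes : Option (List (String × List String)))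
    (xs : List String) (n : Int) (d : PySem.Dict String (List Int)) :
    (PySem.List.enumerate xs n).foldl
      (fun (d : PySem.Dict String (List Int)) (p : Int × String) =>
        let idx := p.1
        let strategy := p.2
        let hit : Option (String × List String) :=
          match group_prefixes with
          | none => none
          | some gl =>
            if gl.isEmpty then none
            else gl.find? (fun gx => gx.2.any (fun pref => PySem.Str.startswith strategy pref))
        match hit with
        | some gx => d.modify gx.1 [] (fun l => l ++ [idx])
        | none => d.modify strategy [] (fun l => l ++ [idx])) d
    = (PySem.List.enumerate xs n).foldl
        (fun (d : PySem.Dict String (List Int)) (p : Int × String) =>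
          d.modify (bgtiCls (match group_prefixes with | none => [] | some gl => gl) p.2) []
            (fun l => l ++ [p.1])) d := by
  induction xs generalizing n d with
  | nil => rfl
  | cons x xs ih =>
    simp only [PySem.List.enumerate_cons, List.foldl]
    rw [← bgti_stepA_eq group_prefixes d n x]
    exact ih _ _

-- one group's inner loop = (insert the matching pairs, keep the rest in order)
theorem bgti_inner_eq (gx : String × List String) (u : List (Int × String))
    (d : PySem.Dict Int String) (acc : List (Int × String)) :
    u.foldl
      (fun (st2 : PySem.Dict Int String × List (Int × String)) p =>
        if bgtiStarts p.2 gx.2 then (st2.1.insert p.1 gx.1, st2.2)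
        else (st2.1, st2.2 ++ [p]))
      (d, acc)
    = ((u.filter (fun p => bgtiStarts p.2 gx.2)).foldl (fun d p => d.insert p.1 gx.1) d,
       acc ++ u.filter (fun p => !bgtiStarts p.2 gx.2)) := by
  induction u generalizing d acc with
  | nil => simp
  | cons p u ih =>
    by_cases h : bgtiStarts p.2 gx.2
    · simp [List.foldl, h, ih]
    · simp [List.foldl, h, ih]

-- a fold of constant-value inserts, read back
theorem bgti_insert_fold_getD (l : List (Int × String)) (v : String)
    (d : PySem.Dict Int String) (i : Int) (dflt : String) :
    (l.foldl (fun d p => d.insert p.1 v) d).getD i dflt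
      = if i ∈ l.map Prod.fst then v else d.getD i dflt := by
  induction l generalizing d with
  | nil => simp
  | cons p l ih =>
    simp only [List.foldl, List.map, List.mem_cons]
    rw [ih, PySem.Dict.getD_insert]
    by_cases h1 : i ∈ l.map Prod.fst <;> by_cases h2 : i = p.1 <;> simp [h1, h2]

-- with pairwise-distinct indices, an index determines its name
theorem bgti_nodup_val {u : List (Int × String)} (h : (u.map Prod.fst).Nodup)
    {i : Int} {a b : String} (ha : (i, a) ∈ u) (hb : (i, b) ∈ u) : a = b := by
  induction u with
  | nil => cases ha
  | cons p u ih =>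
    simp only [List.map, List.nodup_cons] at h
    rcases List.mem_cons.mp ha with h1 | h1 <;> rcases List.mem_cons.mp hb with h2 | h2
    · rw [← h1] at h2
      exact (congrArg Prod.snd h2).symm
    · exact absurd (List.mem_map.mpr ⟨(i, b), h2, by rw [← h1]⟩) h.1
    · exact absurd (List.mem_map.mpr ⟨(i, a), h1, by rw [← h2]⟩) h.1
    · exact ih h.2 h1 h2

-- the sweep never assigns an index absent from the pool
theorem bgti_sweep_untouched (gl : List (String × List String))
    (d : PySem.Dict Int String) (u : List (Int × String)) (i : Int) (dflt : String)
    (h : i ∉ u.map Prod.fst) :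
    (bgtiSweep gl (d, u)).1.getD i dflt = d.getD i dflt := by
  induction gl generalizing d u with
  | nil => rfl
  | cons gx gl ih =>
    have hstep : bgtiSweep (gx :: gl) (d, u)
        = bgtiSweep gl
            ((u.filter (fun p => bgtiStarts p.2 gx.2)).foldl (fun d p => d.insert p.1 gx.1) d,
             [] ++ u.filter (fun p => !bgtiStarts p.2 gx.2)) := by
      show bgtiSweep gl (u.foldl _ (d, [])) = _
      rw [bgti_inner_eq]
    rw [hstep, List.nil_append]
    have h1 : i ∉ (u.filter (fun p => !bgtiStarts p.2 gx.2)).map Prod.fst := by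
      intro hm
      obtain ⟨p, hp, hpi⟩ := List.mem_map.mp hm
      exact h (List.mem_map.mpr ⟨p, (List.mem_filter.mp hp).1, hpi⟩)
    rw [ih _ _ h1, bgti_insert_fold_getD]
    have h2 : i ∉ (u.filter (fun p => bgtiStarts p.2 gx.2)).map Prod.fst := by
      intro hm
      obtain ⟨p, hp, hpi⟩ := List.mem_map.mp hm
      exact h (List.mem_map.mpr ⟨p, (List.mem_filter.mp hp).1, hpi⟩)
    simp [h2]

-- the sweep's assignment of index i, with (i, n) in the pool: the first matching group
theorem bgti_sweep_getD (gl : List (String × List String))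
    (d : PySem.Dict Int String) (u : List (Int × String))
    (hnd : (u.map Prod.fst).Nodup) (i : Int) (n dflt : String) (hmem : (i, n) ∈ u) :
    (bgtiSweep gl (d, u)).1.getD i dflt
      = match gl.find? (fun gx => bgtiStarts n gx.2) with
        | some gx => gx.1
        | none => d.getD i dflt := by
  induction gl generalizing d u with
  | nil => rfl
  | cons gx gl ih =>
    have hstep : bgtiSweep (gx :: gl) (d, u)
        = bgtiSweep gl
            ((u.filter (fun p => bgtiStarts p.2 gx.2)).foldl (fun d p => d.insert p.1 gx.1) d,
             [] ++ u.filter (fun p => !bgtiStarts p.2 gx.2)) := by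
      show bgtiSweep gl (u.foldl _ (d, [])) = _
      rw [bgti_inner_eq]
    rw [hstep, List.nil_append]
    by_cases hm : bgtiStarts n gx.2 = true
    · have hfind : List.find? (fun gz => bgtiStarts n gz.2) (gx :: gl) = some gx :=
        List.find?_cons_of_pos hm
      rw [hfind]
      have hnot : i ∉ (u.filter (fun p => !bgtiStarts p.2 gx.2)).map Prod.fst := by
        intro hm2
        obtain ⟨p, hp, hpi⟩ := List.mem_map.mp hm2
        have hpu := List.mem_filter.mp hp
        have hpn : p.2 = n := by
          refine bgti_nodup_val hnd ?_ hmem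
          rw [show (i, p.2) = p from by rw [← hpi]]
          exact hpu.1
        rw [hpn, hm] at hpu
        simp at hpu
      rw [bgti_sweep_untouched _ _ _ _ _ hnot, bgti_insert_fold_getD]
      have hin : i ∈ (u.filter (fun p => bgtiStarts p.2 gx.2)).map Prod.fst :=
        List.mem_map.mpr ⟨(i, n), List.mem_filter.mpr ⟨hmem, hm⟩, rfl⟩
      simp [hin]
    · have hfind : List.find? (fun gz => bgtiStarts n gz.2) (gx :: gl)
          = List.find? (fun gz => bgtiStarts n gz.2) gl :=
        List.find?_cons_of_neg hm
      rw [hfind]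
      have hnd1 : ((u.filter (fun p => !bgtiStarts p.2 gx.2)).map Prod.fst).Nodup :=
        ((List.filter_sublist.map Prod.fst)).nodup hnd
      have hmem1 : (i, n) ∈ u.filter (fun p => !bgtiStarts p.2 gx.2) :=
        List.mem_filter.mpr ⟨hmem, by simp [hm]⟩
      rw [ih _ _ hnd1 hmem1]
      cases hf : gl.find? (fun gz => bgtiStarts n gz.2) with
      | some g => rfl
      | none =>
        rw [bgti_insert_fold_getD]
        have hnot : i ∉ (u.filter (fun p => bgtiStarts p.2 gx.2)).map Prod.fst := by
          intro hm2
          obtain ⟨p, hp, hpi⟩ := List.mem_map.mp hm2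
          have hpu := List.mem_filter.mp hp
          have hpn : p.2 = n := by
            refine bgti_nodup_val hnd ?_ hmem
            rw [show (i, p.2) = p from by rw [← hpi]]
            exact hpu.1
          rw [hpn] at hpu
          exact hm hpu.2
        simp [hnot]

-- enumerate produces pairwise-distinct indices
theorem bgti_enum_nodup (names : List String) (s : Int) :
    ((PySem.List.enumerate names s).map Prod.fst).Nodup := by
  have hpl := PySem.List.pairwise_lt_enumerate (xs := names) (s := s)
  exact List.pairwise_map.mpr (hpl.imp fun h => ne_of_lt h)

-- ===== VERDICT (by name: the statement is the Claim_ definition above) =====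
theorem build_group_to_indices_spec : Claim_equal_build_group_to_indices := by
  intro strategy_configs group_prefixes _
  unfold Spec_build_group_to_indices build_group_to_indices build_group_to_indices_alt
  rw [bgti_foldA_eq]
  dsimp only
  congr 1
  apply PySem.List.foldl_congr_mem
  intro acc p hp
  congr 2
  rw [bgti_sweep_getD _ _ _ (bgti_enum_nodup _ 0) p.1 p.2 p.2 (by simpa using hp)]
  unfold bgtiCls
  cases hF : (match group_prefixes with | none => [] | some gl => gl).find?
      (fun (gx : String × List String) => bgtiStarts p.2 gx.2) with
  | some g => simp
  | none => simp [PySem.Dict.getD_empty]
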